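-- pv_equiv track=rewrite | github.com/trents/sudoku_solver | sudoku_solver.py | find_x_wing_pairs
-- ===== SOURCE A (Python) =====
-- def find_x_wing_pairs(pair_array):
--     pair_array_return = []
--     i = 0
--     while i < len(pair_array):
--         j = i+1
--         while j < len(pair_array):
--             if pair_array[i][1] == pair_array[j][1] and pair_array[i][2] == pair_array[j][2] and pair_array[i][3] == pair_array[j][3]:
--                   pair_array_return.append([pair_array[i][1],pair_array[i][0],pair_array[j][0],pair_array[j][2],pair_array[j][3]])
--             j += 1
--         i += 1
--     return pair_array_return
-- ===== SOURCE B (Python) =====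
-- def find_x_wing_pairs(pair_array):
--     # Group rows by their (col1, col2, col3) slice; one linear pass builds the
--     # groups, a second pass emits, for each row, a pair with every LATER member
--     # of its group, which reproduces the (i, j) lexicographic output order.
--     groups = {}
--     for row in pair_array:
--         groups.setdefault(tuple(row[1:4]), []).append(row[0])
--     pos = {}
--     out = []
--     for row in pair_array:
--         key = tuple(row[1:4])
--         p = pos.get(key, 0)
--         pos[key] = p + 1
--         for m in groups[key][p + 1:]:
--             out.append([row[1], row[0], m, row[2], row[3]])
--     return out
-- ===== Notes on version B (the rewrite author's own statement) =====
-- stated objective: faster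
-- what changed: Replaces the all-pairs nested index scan by two linear passes: a dict groups rows by (col1,col2,col3), then each row is paired with the later members of its own group, which yields the same (i,j)-lexicographic output without comparing unrelated rows.
-- outside the precondition, e.g. on find_x_wing_pairs([[]]): A returns [], B raises IndexError
import Mathlib
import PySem

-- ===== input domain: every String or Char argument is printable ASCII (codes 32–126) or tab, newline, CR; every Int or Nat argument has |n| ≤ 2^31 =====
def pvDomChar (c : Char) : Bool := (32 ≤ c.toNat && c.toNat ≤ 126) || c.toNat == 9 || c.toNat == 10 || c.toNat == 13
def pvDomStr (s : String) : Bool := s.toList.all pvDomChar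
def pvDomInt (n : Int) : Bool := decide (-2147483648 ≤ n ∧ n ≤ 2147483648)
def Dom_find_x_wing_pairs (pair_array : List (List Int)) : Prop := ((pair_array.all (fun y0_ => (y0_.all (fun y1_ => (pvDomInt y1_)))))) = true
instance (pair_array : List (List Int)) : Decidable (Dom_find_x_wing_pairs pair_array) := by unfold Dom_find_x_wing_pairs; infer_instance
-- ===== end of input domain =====

-- B replaces A's all-pairs nested scan by dict grouping on the (col1,col2,col3) slice
-- plus one emitting pass (objective: faster on inputs with few matching groups).

-- ===== PORT A =====
-- A's nested while loops.  Loop indices are Nats strictly below p.length, so Python's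
-- pair_array[i] is exactly List.getD i []; row[k] is List.getD k 0, exact on the rows
-- Python actually indexes without IndexError (Pre_ admits exactly those inputs).
def pvA_inner (p : List (List Int)) (i j : Nat) (acc : List (List Int)) : List (List Int) :=
  if _h : j < p.length then
    pvA_inner p i (j + 1)
      (if (p.getD i []).getD 1 0 = (p.getD j []).getD 1 0 ∧
          (p.getD i []).getD 2 0 = (p.getD j []).getD 2 0 ∧
          (p.getD i []).getD 3 0 = (p.getD j []).getD 3 0 then
        acc ++ [[(p.getD i []).getD 1 0, (p.getD i []).getD 0 0, (p.getD j []).getD 0 0,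
                 (p.getD j []).getD 2 0, (p.getD j []).getD 3 0]]
      else acc)
  else acc
termination_by p.length - j

def pvA_outer (p : List (List Int)) (i : Nat) (acc : List (List Int)) : List (List Int) :=
  if _h : i < p.length then pvA_outer p (i + 1) (pvA_inner p i (i + 1) acc) else acc
termination_by p.length - i

def find_x_wing_pairs (pair_array : List (List Int)) : List (List Int) :=
  pvA_outer pair_array 0 []

-- ===== PORT B =====
-- tuple(row[1:4]) — the dict key of Source B
def pvKey (r : List Int) : List Int := PySem.List.slice r (some 1) (some 4)

-- first pass of Source B: groups.setdefault(tuple(row[1:4]), []).append(row[0])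
def pvB_groups (p : List (List Int)) : PySem.Dict (List Int) (List Int) :=
  p.foldl (fun d row => d.modify (pvKey row) [] (fun v => v ++ [row.getD 0 0])) PySem.Dict.empty

-- one step of Source B's second pass; state = (pos dict, out list)
def pvB_step (groups : PySem.Dict (List Int) (List Int))
    (st : PySem.Dict (List Int) Int × List (List Int)) (row : List Int) :
    PySem.Dict (List Int) Int × List (List Int) :=
  let k := pvKey row
  let pp := st.1.getD k 0
  let out := (PySem.List.slice (groups.getD k []) (some (pp + 1))).foldl
    (fun o m => o ++ [[row.getD 1 0, row.getD 0 0, m, row.getD 2 0, row.getD 3 0]]) st.2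
  (st.1.insert k (pp + 1), out)

def find_x_wing_pairs_alt (pair_array : List (List Int)) : List (List Int) :=
  let groups := pvB_groups pair_array
  (pair_array.foldl (pvB_step groups) (PySem.Dict.empty, [])).2

-- ===== PRECONDITION & SPEC =====
-- pvOk ri rj: comparing rows ri (earlier) and rj (later) raises no IndexError in A:
-- A reads ri[1], rj[1]; only on equality ri[2], rj[2]; only then ri[3], rj[3].
def pvOk (ri rj : List Int) : Prop :=
  2 ≤ ri.length ∧ 2 ≤ rj.length ∧
    (ri.getD 1 0 = rj.getD 1 0 →
      3 ≤ ri.length ∧ 3 ≤ rj.length ∧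
        (ri.getD 2 0 = rj.getD 2 0 → 4 ≤ ri.length ∧ 4 ≤ rj.length))

-- Pre_ excludes exactly the inputs where Python raises an IndexError: A raises iff some
-- compared pair of rows violates pvOk; B additionally reads row[0] of every row, so rows
-- must be nonempty (the only inputs that excludes on which A returns are single-row
-- arrays whose row is empty, where A returns the empty list and B raises IndexError).
def Pre_find_x_wing_pairs (pair_array : List (List Int)) : Prop :=
  (∀ r ∈ pair_array, 1 ≤ r.length) ∧ pair_array.Pairwise pvOk
instance (pair_array : List (List Int)) : Decidable (Pre_find_x_wing_pairs pair_array) := by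
  unfold Pre_find_x_wing_pairs pvOk; infer_instance

def pvWitness_find_x_wing_pairs : List (List Int) := [[1, 2, 3, 4], [5, 2, 3, 4], [6, 7, 8, 9]]

def Spec_find_x_wing_pairs (pair_array : List (List Int)) (out : List (List Int)) : Prop :=
  out = find_x_wing_pairs_alt pair_array
instance (pair_array : List (List Int)) (out : List (List Int)) :
    Decidable (Spec_find_x_wing_pairs pair_array out) := by
  unfold Spec_find_x_wing_pairs; infer_instance

-- ===== CLAIM (what is proved, stated in full; the proofs are below) =====
def Claim_equal_find_x_wing_pairs : Prop :=
  ∀ (pair_array : List (List Int)), Dom_find_x_wing_pairs pair_array →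
    Pre_find_x_wing_pairs pair_array →
    Spec_find_x_wing_pairs pair_array (find_x_wing_pairs pair_array)

-- ===== LEMMAS AND PROOFS =====

-- the triple of values A compares, and the records A and B emit for a matching pair
def pvTriple (r : List Int) : Int × Int × Int := (r.getD 1 0, r.getD 2 0, r.getD 3 0)
def pvRecord (ri rj : List Int) : List Int :=
  [ri.getD 1 0, ri.getD 0 0, rj.getD 0 0, rj.getD 2 0, rj.getD 3 0]
def pvRecordB (ri rj : List Int) : List Int :=
  [ri.getD 1 0, ri.getD 0 0, rj.getD 0 0, ri.getD 2 0, ri.getD 3 0]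

-- A's (resp. B's) output for a fixed first row i, as a filter over the later indices
def pvInnerA (p : List (List Int)) (i : Nat) : List (List Int) :=
  ((List.range' (i + 1) (p.length - (i + 1))).filter
      (fun j => pvTriple (p.getD j []) == pvTriple (p.getD i []))).map
    (fun j => pvRecord (p.getD i []) (p.getD j []))

def pvInnerB (p : List (List Int)) (i : Nat) : List (List Int) :=
  ((List.range' (i + 1) (p.length - (i + 1))).filter
      (fun j => pvKey (p.getD j []) == pvKey (p.getD i []))).map
    (fun j => pvRecordB (p.getD i []) (p.getD j []))

lemma pvA_inner_eq (p : List (List Int)) (i : Nat) :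
    ∀ (m j : Nat), j + m = p.length → ∀ acc,
      pvA_inner p i j acc = acc ++
        ((List.range' j m).filter (fun jj => pvTriple (p.getD jj []) == pvTriple (p.getD i []))).map
          (fun jj => pvRecord (p.getD i []) (p.getD jj [])) := by
  intro m
  induction m with
  | zero => intro j hj acc; rw [pvA_inner]; rw [dif_neg (by omega)]; simp
  | succ m ih =>
    intro j hj acc
    have hlt : j < p.length := by omega
    rw [pvA_inner]
    rw [dif_pos hlt]
    rw [ih (j + 1) (by omega)]
    rw [List.range'_succ, List.filter_cons]
    by_cases hc : pvTriple (p.getD j []) == pvTriple (p.getD i [])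
    · have hc' : (p.getD i []).getD 1 0 = (p.getD j []).getD 1 0 ∧
          (p.getD i []).getD 2 0 = (p.getD j []).getD 2 0 ∧
          (p.getD i []).getD 3 0 = (p.getD j []).getD 3 0 := by
        have := (beq_iff_eq (a := pvTriple (p.getD j [])) (b := pvTriple (p.getD i []))).1 hc
        simp [pvTriple, Prod.ext_iff] at this
        exact ⟨this.1.symm, this.2.1.symm, this.2.2.symm⟩
      rw [if_pos hc']
      have hceq : pvTriple (p.getD j []) = pvTriple (p.getD i []) := beq_iff_eq.1 hc
      simp only [List.getD_eq_getElem?_getD] at hceq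
      simp [hceq, pvRecord]
    · have hc' : ¬ ((p.getD i []).getD 1 0 = (p.getD j []).getD 1 0 ∧
          (p.getD i []).getD 2 0 = (p.getD j []).getD 2 0 ∧
          (p.getD i []).getD 3 0 = (p.getD j []).getD 3 0) := by
        intro h
        apply hc
        apply beq_iff_eq.2
        simp only [pvTriple, Prod.ext_iff]
        exact ⟨h.1.symm, h.2.1.symm, h.2.2.symm⟩
      rw [if_neg hc']
      have hcne : ¬ pvTriple (p.getD j []) = pvTriple (p.getD i []) := by
        intro h; exact hc (beq_iff_eq.2 h)
      simp only [List.getD_eq_getElem?_getD] at hcne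
      simp [hcne]

lemma pvA_outer_eq (p : List (List Int)) :
    ∀ (m i : Nat), i + m = p.length → ∀ acc,
      pvA_outer p i acc = acc ++ (List.range' i m).flatMap (pvInnerA p) := by
  intro m
  induction m with
  | zero => intro i hi acc; rw [pvA_outer]; rw [dif_neg (by omega)]; simp
  | succ m ih =>
    intro i hi acc
    rw [pvA_outer, dif_pos (by omega)]
    rw [ih (i + 1) (by omega)]
    rw [pvA_inner_eq p i (p.length - (i + 1)) (i + 1) (by omega)]
    rw [List.range'_succ, List.flatMap_cons]
    rw [pvInnerA, List.append_assoc]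

lemma pv_map_getD_range' :
    ∀ (l' pref : List (List Int)),
      (List.range' pref.length l'.length).map (fun j => (pref ++ l').getD j []) = l' := by
  intro l'
  induction l' with
  | nil => intro pref; simp
  | cons r l ih =>
    intro pref
    have h1 : (pref ++ r :: l).getD pref.length [] = r := by
      rw [List.getD_append_right _ _ _ _ (le_refl _)]; simp
    have h2 : pref ++ r :: l = (pref ++ [r]) ++ l := by simp
    have h3 := ih (pref ++ [r])
    rw [List.length_cons, List.range'_succ, List.map_cons, h1]
    rw [show pref.length + 1 = (pref ++ [r]).length by simp]
    rw [h2, h3]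

lemma pvInner_split (pref : List (List Int)) (r : List Int) (l' : List (List Int)) :
    pvInnerB (pref ++ r :: l') pref.length =
      (l'.filter (fun rj => pvKey rj == pvKey r)).map (fun rj => pvRecordB r rj) := by
  have hr : (pref ++ r :: l').getD pref.length [] = r := by
    rw [List.getD_append_right _ _ _ _ (le_refl _)]; simp
  have hlen : (pref ++ r :: l').length - (pref.length + 1) = l'.length := by
    simp; omega
  have hb : (List.range' (pref.length + 1) l'.length).map
      (fun j => (pref ++ r :: l').getD j []) = l' := by
    have := pv_map_getD_range' l' (pref ++ [r])
    simpa using this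
  unfold pvInnerB
  rw [hr, hlen]
  conv_rhs => rw [← hb]
  rw [List.filter_map, List.map_map]
  rfl

lemma pv_groups_getD (p : List (List Int)) (k : List Int) :
    (pvB_groups p).getD k [] = (p.filter (fun r => pvKey r == k)).map (fun r => r.getD 0 0) := by
  unfold pvB_groups
  have h := PySem.Dict.getD_foldl_modify_append
      (p.map (fun r => (pvKey r, r.getD 0 0))) (PySem.Dict.empty) k
  rw [List.foldl_map] at h
  rw [List.filter_map, List.map_map] at h
  simpa using h

lemma pvB_loop (p : List (List Int)) :
    ∀ (l' pref : List (List Int)) (pos : PySem.Dict (List Int) Int)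
      (out : List (List Int)),
      p = pref ++ l' →
      (∀ k, pos.getD k 0 = (pref.countP (fun r => pvKey r == k) : Int)) →
      (l'.foldl (pvB_step (pvB_groups p)) (pos, out)).2 =
        out ++ (List.range' pref.length l'.length).flatMap (pvInnerB p) := by
  intro l'
  induction l' with
  | nil => intro pref pos out hp hpos; simp
  | cons r l ih =>
    intro pref pos out hp hpos
    rw [List.foldl_cons]
    set k := pvKey r with hk
    set c : Nat := pref.countP (fun rr => pvKey rr == k) with hc
    have hmem : (pvB_groups p).getD k [] =
        ((pref.filter (fun rr => pvKey rr == k)).map (fun rr => rr.getD 0 0)) ++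
          (r.getD 0 0) :: ((l.filter (fun rr => pvKey rr == k)).map (fun rr => rr.getD 0 0)) := by
      rw [pv_groups_getD, hp]
      rw [List.filter_append, List.filter_cons_of_pos (by simp [hk])]
      simp
    have hslice : PySem.List.slice ((pvB_groups p).getD k []) (some ((pos.getD k 0) + 1)) =
        (l.filter (fun rr => pvKey rr == k)).map (fun rr => rr.getD 0 0) := by
      rw [hpos k, hmem]
      rw [show ((c : Int) + 1) = ((c + 1 : Nat) : Int) by push_cast; ring]
      rw [PySem.List.slice_from _ (by positivity)]
      rw [Int.toNat_natCast]
      have hlenc : ((pref.filter (fun rr => pvKey rr == k)).map (fun rr => rr.getD 0 0)).length = c := by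
        rw [List.length_map, hc]; exact List.countP_eq_length_filter.symm
      rw [show ((pref.filter (fun rr => pvKey rr == k)).map (fun rr => rr.getD 0 0)) ++
            (r.getD 0 0) :: ((l.filter (fun rr => pvKey rr == k)).map (fun rr => rr.getD 0 0)) =
          (((pref.filter (fun rr => pvKey rr == k)).map (fun rr => rr.getD 0 0)) ++ [r.getD 0 0]) ++
            ((l.filter (fun rr => pvKey rr == k)).map (fun rr => rr.getD 0 0)) by simp]
      rw [show c + 1 = (((pref.filter (fun rr => pvKey rr == k)).map (fun rr => rr.getD 0 0)) ++ [r.getD 0 0]).length by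
        rw [List.length_append, hlenc]; simp]
      exact List.drop_left
    have hstep : pvB_step (pvB_groups p) (pos, out) r =
        (pos.insert k (pos.getD k 0 + 1),
         out ++ ((l.filter (fun rr => pvKey rr == k)).map
           (fun rr => [r.getD 1 0, r.getD 0 0, rr.getD 0 0, r.getD 2 0, r.getD 3 0]))) := by
      unfold pvB_step
      simp only [← hk]
      simp only [hslice]
      rw [PySem.List.foldl_append_singleton_eq_map]
      rw [List.map_map]
      rfl
    rw [hstep]
    have hp' : p = (pref ++ [r]) ++ l := by simp [hp]
    have hpos' : ∀ k', (pos.insert k (pos.getD k 0 + 1)).getD k' 0 =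
        ((pref ++ [r]).countP (fun rr => pvKey rr == k') : Int) := by
      intro k'
      by_cases hkk : k' = k
      · subst hkk
        rw [PySem.Dict.getD_insert_self, hpos k]
        simp [List.countP_append, hk]
      · rw [PySem.Dict.getD_insert_of_ne _ _ _ hkk, hpos k']
        have : [r].countP (fun rr => pvKey rr == k') = 0 := by
          simp [List.countP_cons]
          intro hcon
          exact hkk (by rw [← hcon])
        simp [List.countP_append, this]
    have := ih (pref ++ [r]) (pos.insert k (pos.getD k 0 + 1))
        (out ++ (l.filter (fun rr => pvKey rr == k)).map
          (fun rr => [r.getD 1 0, r.getD 0 0, rr.getD 0 0, r.getD 2 0, r.getD 3 0])) hp' hpos'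
    rw [this]
    have hsplit : pvInnerB p pref.length =
        (l.filter (fun rr => pvKey rr == k)).map
          (fun rr => [r.getD 1 0, r.getD 0 0, rr.getD 0 0, r.getD 2 0, r.getD 3 0]) := by
      rw [hp]
      exact pvInner_split pref r l
    rw [List.length_cons, List.range'_succ, List.flatMap_cons, ← hsplit]
    simp [List.append_assoc]

-- on rows A compares without IndexError, slice-key equality is triple equality
lemma pvKey_cons2 (a b : Int) (t : List Int) : pvKey (a :: b :: t) = b :: t.take 2 := by
  rcases t with _ | ⟨x, _ | ⟨y, t2⟩⟩
  · rfl
  · rfl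
  · show PySem.List.slice (a :: b :: x :: y :: t2) (some 1) (some 4) = _
    simp [PySem.List.slice, PySem.List.clampIdx]

lemma pv_key_eq_triple (ri rj : List Int) (h : pvOk ri rj) :
    (pvKey ri = pvKey rj) ↔ (pvTriple ri = pvTriple rj) := by
  obtain ⟨hi2, hj2, himp⟩ := h
  match ri, rj with
  | a :: b :: ti, c :: d :: tj =>
    rw [pvKey_cons2, pvKey_cons2]
    constructor
    · intro hkey
      have hbd : b = d := (List.cons.injEq _ _ _ _ ▸ hkey).1
      have htk : ti.take 2 = tj.take 2 := (List.cons.injEq _ _ _ _ ▸ hkey).2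
      have h1 : (a :: b :: ti).getD 1 0 = (c :: d :: tj).getD 1 0 := by simp [hbd]
      obtain ⟨hi3, hj3, himp2⟩ := himp h1
      match ti, tj with
      | e :: ti2, f :: tj2 =>
        have hef : e = f := by simpa [List.take] using congrArg (fun l => l.headI) htk
        have h2 : (a :: b :: e :: ti2).getD 2 0 = (c :: d :: f :: tj2).getD 2 0 := by simp [hef]
        obtain ⟨hi4, hj4⟩ := himp2 h2
        match ti2, tj2 with
        | g :: ti3, h' :: tj3 =>
          have hgh : g = h' := by
            simpa [List.take] using congrArg (fun l => l.tail.headI) htk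
          simp [pvTriple, hbd, hef, hgh]
        | [], _ => simp at hi4
        | _ :: _, [] => simp at hj4
      | [], _ => simp at hi3
      | _ :: _, [] => simp at hj3
    · intro htri
      have h1 : (a :: b :: ti).getD 1 0 = (c :: d :: tj).getD 1 0 :=
        congrArg (fun q => q.1) htri
      obtain ⟨hi3, hj3, himp2⟩ := himp h1
      have h2 : (a :: b :: ti).getD 2 0 = (c :: d :: tj).getD 2 0 :=
        congrArg (fun q => q.2.1) htri
      obtain ⟨hi4, hj4⟩ := himp2 h2
      have h3 : (a :: b :: ti).getD 3 0 = (c :: d :: tj).getD 3 0 :=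
        congrArg (fun q => q.2.2) htri
      match ti, tj with
      | e :: g :: ti3, f :: h' :: tj3 =>
        have hbd : b = d := by simpa using h1
        have hef : e = f := by simpa using h2
        have hgh : g = h' := by simpa using h3
        simp [List.take, hbd, hef, hgh]
      | [], _ => simp at hi3
      | [_], _ => simp at hi4
      | _ :: _, [] => simp at hj3
      | _ :: _, [_] => simp at hj4
  | [], _ => simp at hi2
  | [_], _ => simp at hi2
  | _ :: _ :: _, [] => simp at hj2
  | _ :: _ :: _, [_] => simp at hj2

-- under Pre_, A's and B's per-row outputs coincide
lemma pvInner_congr (p : List (List Int)) (hp : p.Pairwise pvOk) (i : Nat) :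
    pvInnerA p i = pvInnerB p i := by
  have hOk : ∀ j, i + 1 ≤ j → j < p.length → pvOk (p.getD i []) (p.getD j []) := by
    intro j h1 h2
    have hi : i < p.length := by omega
    have := (List.pairwise_iff_getElem).1 hp i j hi h2 (by omega)
    simpa [List.getD_eq_getElem?_getD, List.getElem?_eq_getElem hi,
      List.getElem?_eq_getElem h2] using this
  unfold pvInnerA pvInnerB
  rw [List.filter_congr (q := fun j => pvKey (p.getD j []) == pvKey (p.getD i []))]
  · apply List.map_congr_left
    intro j hj
    have hjm := List.mem_filter.1 hj
    have hjr := List.mem_range'_1.1 hjm.1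
    have hok := hOk j hjr.1 (by omega)
    have hkeq : pvKey (p.getD j []) = pvKey (p.getD i []) := beq_iff_eq.1 hjm.2
    have htri : pvTriple (p.getD i []) = pvTriple (p.getD j []) :=
      ((pv_key_eq_triple _ _ hok).1 hkeq.symm)
    have h2 : (p.getD i []).getD 2 0 = (p.getD j []).getD 2 0 :=
      congrArg (fun q => q.2.1) htri
    have h3 : (p.getD i []).getD 3 0 = (p.getD j []).getD 3 0 :=
      congrArg (fun q => q.2.2) htri
    simp only [List.getD_eq_getElem?_getD] at h2 h3
    simp [pvRecord, pvRecordB, h2, h3]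
  · intro j hj
    have hjr := List.mem_range'_1.1 hj
    have hok := hOk j hjr.1 (by omega)
    have hiff := pv_key_eq_triple _ _ hok
    simp only [List.getD_eq_getElem?_getD] at hiff
    rw [Bool.eq_iff_iff]
    simp only [beq_iff_eq]
    constructor
    · intro h; exact (hiff.2 h.symm).symm
    · intro h; exact (hiff.1 h.symm).symm

-- ===== VERDICT (by name: the statement is the Claim_ definition above) =====
theorem find_x_wing_pairs_spec : Claim_equal_find_x_wing_pairs := by
  intro p _ hpre
  unfold Spec_find_x_wing_pairs
  have hA : find_x_wing_pairs p = (List.range' 0 p.length).flatMap (pvInnerA p) := by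
    simpa using pvA_outer_eq p p.length 0 (by omega) []
  have hB : find_x_wing_pairs_alt p = (List.range' 0 p.length).flatMap (pvInnerB p) := by
    have := pvB_loop p p [] PySem.Dict.empty [] rfl (by
      intro k; simp [PySem.Dict.getD_empty])
    simpa [find_x_wing_pairs_alt] using this
  rw [hA, hB]
  rw [funext (pvInner_congr p hpre.2)]
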